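-- pv_equiv track=rewrite | github.com/englishta/Machine-Learning | make_tree.py | dfs_array_search2
-- ===== SOURCE A (Python) =====
-- def dfs_array_search2(now, graph, node, name, type, size):
--     if 'ID:' in node[now]:
--         size = node[now].replace('ID:', '').replace(' ', '')
--     if 'IdentifierType:' in node[now]:
--         type = node[now].replace('IdentifierType:', '').replace(' ', '').replace('[', '').replace(']', '').replace("'", '')
--     if 'Struct:' in node[now]:
--         type = node[now].replace('Struct:', '').replace(' ', '')
--     if 'TypeDecl:' in node[now]:
--         name = node[now].replace('TypeDecl:', '').replace(' ', '').replace('[', '').replace(']', '').replace(',', '')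
--
--     for next in graph[now]:
--         if next < now: continue # 親は訪問しない
--         name, type, size = dfs_array_search2(next, graph, node, name, type, size)
--     return name, type, size
-- ===== SOURCE B (Python) =====
-- def dfs_array_search2(now, graph, node, name, type, size):
--     # Iterative preorder DFS with an explicit stack instead of recursion.
--     stack = [now]
--     while stack:
--         cur = stack.pop()
--         s = node[cur]
--         if 'ID:' in s:
--             size = s.replace('ID:', '').replace(' ', '')
--         if 'IdentifierType:' in s:
--             type = s.replace('IdentifierType:', '').replace(' ', '').replace('[', '').replace(']', '').replace("'", '')
--         if 'Struct:' in s: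
--             type = s.replace('Struct:', '').replace(' ', '')
--         if 'TypeDecl:' in s:
--             name = s.replace('TypeDecl:', '').replace(' ', '').replace('[', '').replace(']', '').replace(',', '')
--         children = [nxt for nxt in graph[cur] if nxt >= cur]
--         stack.extend(reversed(children))
--     return name, type, size
-- ===== Notes on version B (the rewrite author's own statement) =====
-- stated objective: idiomatic
-- what changed: The recursive DFS is replaced by an iterative preorder DFS with an explicit stack (children pushed in reverse so the visit order matches), threading name/type/size as plain variables; this also avoids Python's recursion limit on deep trees.
-- outside the precondition, e.g. on dfs_array_search2(-1, [[]], ['ID: 7'], '', '', ''): A returns ('', '', '7'), B returns ('', '', '7'); on dfs_array_search2(0, [[], [5]], ['a', 'b'], '', '', ''): A returns ('', '', ''), B returns ('', '', '')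
import Mathlib
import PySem

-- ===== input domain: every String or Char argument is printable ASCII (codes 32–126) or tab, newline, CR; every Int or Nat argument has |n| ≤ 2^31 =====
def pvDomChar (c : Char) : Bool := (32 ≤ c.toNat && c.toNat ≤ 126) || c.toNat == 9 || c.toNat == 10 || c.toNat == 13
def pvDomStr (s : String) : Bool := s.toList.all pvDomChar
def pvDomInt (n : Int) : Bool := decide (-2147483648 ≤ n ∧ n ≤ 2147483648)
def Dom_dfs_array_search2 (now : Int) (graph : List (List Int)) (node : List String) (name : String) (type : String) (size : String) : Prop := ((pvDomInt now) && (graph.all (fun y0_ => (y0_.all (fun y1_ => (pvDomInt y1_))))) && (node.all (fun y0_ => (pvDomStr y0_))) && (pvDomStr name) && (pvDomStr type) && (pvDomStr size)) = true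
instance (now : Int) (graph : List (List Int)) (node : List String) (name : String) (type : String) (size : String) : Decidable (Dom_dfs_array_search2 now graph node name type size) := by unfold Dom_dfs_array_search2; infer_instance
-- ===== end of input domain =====

-- B replaces A's recursion by an explicit-stack iterative preorder DFS (same visit order); equal return values, no mutation involved.

-- ===== PORT A =====
-- the four guarded string rewrites applied to (name, type, size) at each visited node (identical block in both Pythons)
def pvStep (s : String) (st : String × String × String) : String × String × String :=
  let size := if PySem.Str.isIn "ID:" s then
      PySem.Str.replace (PySem.Str.replace s "ID:" "") " " "" else st.2.2
  let type := if PySem.Str.isIn "IdentifierType:" s then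
      PySem.Str.replace (PySem.Str.replace (PySem.Str.replace (PySem.Str.replace (PySem.Str.replace s "IdentifierType:" "") " " "") "[" "") "]" "") "'" "" else st.2.1
  let type := if PySem.Str.isIn "Struct:" s then
      PySem.Str.replace (PySem.Str.replace s "Struct:" "") " " "" else type
  let name := if PySem.Str.isIn "TypeDecl:" s then
      PySem.Str.replace (PySem.Str.replace (PySem.Str.replace (PySem.Str.replace (PySem.Str.replace s "TypeDecl:" "") " " "") "[" "") "]" "") "," "" else st.1
  (name, type, size)

-- A's recursion, with a fuel counter as a totality guard (under Pre_ the fuel graph.length+1 is never exhausted)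
def pvDfsA (graph : List (List Int)) (node : List String) : Nat → Int → String × String × String → String × String × String
  | 0, _, st => st
  | fuel+1, now, st =>
    let st := pvStep (PySem.List.pyGetD node now "") st
    (PySem.List.pyGetD graph now []).foldl
      (fun st next => if next < now then st else pvDfsA graph node fuel next st) st

def dfs_array_search2 (now : Int) (graph : List (List Int)) (node : List String) (name : String) (type : String) (size : String) : String × String × String :=
  pvDfsA graph node (graph.length + 1) now (name, type, size)

-- ===== PORT B =====
-- totality guard for a pushed child: under Pre_ it coincides with Python B's filter `nxt >= cur`
def pvGuard (L : Nat) (cur j : Int) : Bool := decide (0 ≤ cur) && decide (cur < j) && decide (j < (L : Int))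

-- termination measure for the stack loop
def pvW (L C : Nat) (j : Int) : Nat := (C + 1) ^ (L - j.toNat)
def pvMeasure (L C : Nat) (S : List Int) : Nat := (S.map (pvW L C)).sum

-- each pop strictly decreases the measure (cited by pvLoopB's decreasing_by)
theorem pvChildren_lt (graph : List (List Int)) (cur : Int) :
    pvMeasure graph.length ((graph.map List.length).sum)
      ((PySem.List.pyGetD graph cur []).filter (pvGuard graph.length cur))
    < pvW graph.length ((graph.map List.length).sum) cur := by
  set L := graph.length with hL
  set C := (graph.map List.length).sum with hC
  set row := PySem.List.pyGetD graph cur [] with hrow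
  set ch := row.filter (pvGuard L cur) with hch
  by_cases hne : ch = []
  · simp only [pvMeasure, hne, List.map_nil, List.sum_nil, pvW]
    exact Nat.pow_pos (by omega)
  · obtain ⟨j, hj⟩ := List.exists_mem_of_ne_nil ch hne
    have hg : pvGuard L cur j = true := List.of_mem_filter hj
    simp only [pvGuard, Bool.and_eq_true, decide_eq_true_eq] at hg
    obtain ⟨⟨hc0, hcj⟩, hjL⟩ := hg
    have hcurL : cur.toNat < L := by omega
    have hrowmem : row = graph[cur.toNat] := by
      rw [hrow]; exact PySem.List.pyGetD_eq_getElem graph [] hc0 (by omega)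
    have hrlen : row.length ≤ C := by
      have hm : row.length ∈ graph.map List.length := by
        rw [hrowmem]; exact List.mem_map_of_mem (List.getElem_mem _)
      exact List.single_le_sum (fun x _ => Nat.zero_le x) _ hm
    have hbound : ∀ x ∈ ch.map (pvW L C), x ≤ (C + 1) ^ (L - cur.toNat - 1) := by
      intro x hx
      obtain ⟨k, hk, rfl⟩ := List.mem_map.mp hx
      have hgk : pvGuard L cur k = true := List.of_mem_filter hk
      simp only [pvGuard, Bool.and_eq_true, decide_eq_true_eq] at hgk
      have : L - k.toNat ≤ L - cur.toNat - 1 := by omega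
      exact Nat.pow_le_pow_right (by omega) this
    have hsum : pvMeasure L C ch ≤ ch.length * (C + 1) ^ (L - cur.toNat - 1) := by
      simpa [pvMeasure] using List.sum_le_card_nsmul (ch.map (pvW L C)) _ hbound
    have hchlen : ch.length ≤ C := le_trans (List.length_filter_le _ _) hrlen
    have hpow : 0 < (C + 1) ^ (L - cur.toNat - 1) := Nat.pow_pos (by omega)
    have hfin : ch.length * (C + 1) ^ (L - cur.toNat - 1) < (C + 1) ^ (L - cur.toNat) := by
      have he : (C + 1) ^ (L - cur.toNat) = (C + 1) * (C + 1) ^ (L - cur.toNat - 1) := by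
        rw [← pow_succ']
        congr 1
        omega
      rw [he]
      exact Nat.mul_lt_mul_of_lt_of_le (by omega) le_rfl hpow
    calc pvMeasure L C ch ≤ _ := hsum
      _ < _ := hfin

-- B's while loop: pop the head, rewrite the state, push the (guarded) forward neighbours in order
def pvLoopB (graph : List (List Int)) (node : List String) : List Int → String × String × String → String × String × String
  | [], st => st
  | cur :: rest, st =>
    let st := pvStep (PySem.List.pyGetD node cur "") st
    let children := (PySem.List.pyGetD graph cur []).filter (pvGuard graph.length cur)
    pvLoopB graph node (children ++ rest) st
termination_by S _ => pvMeasure graph.length ((graph.map List.length).sum) S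
decreasing_by
  simp only [pvMeasure, List.map_append, List.sum_append, List.map_cons, List.sum_cons]
  have h := pvChildren_lt graph cur
  simp only [pvMeasure] at h
  omega

def dfs_array_search2_alt (now : Int) (graph : List (List Int)) (node : List String) (name : String) (type : String) (size : String) : String × String × String :=
  pvLoopB graph node [now] (name, type, size)

-- ===== PRECONDITION & SPEC =====
-- Pre_ restricts to the natural domain of the task: a non-negative in-range root indexing node, and in
-- every row from the root onwards each edge is either a back edge (j < i) or a strict forward edge with
-- j valid in both graph and node. Outside it Python A raises IndexError / RecursionError or silently
-- uses negative-index wraparound; the edge condition covers all rows ≥ now (reachability is not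
-- closed-form), so it also excludes some inputs whose offending rows are never visited and on which A
-- returns (see the cites in the claim).
def Pre_dfs_array_search2 (now : Int) (graph : List (List Int)) (node : List String) (name : String) (type : String) (size : String) : Prop :=
  0 ≤ now ∧ now < (graph.length : Int) ∧ now < (node.length : Int) ∧
  ∀ i : Fin graph.length, now ≤ (i.val : Int) → ∀ j ∈ graph.get i,
    j < (i.val : Int) ∨ ((i.val : Int) < j ∧ j < (graph.length : Int) ∧ j < (node.length : Int))
instance (now : Int) (graph : List (List Int)) (node : List String) (name : String) (type : String) (size : String) : Decidable (Pre_dfs_array_search2 now graph node name type size) := by unfold Pre_dfs_array_search2; infer_instance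

def pvWitness_dfs_array_search2 : Int × List (List Int) × List String × String × String × String :=
  (0, [[1], []], ["TypeDecl: x", "ID: 7"], "", "", "")

def Spec_dfs_array_search2 (now : Int) (graph : List (List Int)) (node : List String) (name : String) (type : String) (size : String) (out : String × String × String) : Prop := out = dfs_array_search2_alt now graph node name type size
instance (now : Int) (graph : List (List Int)) (node : List String) (name : String) (type : String) (size : String) (out : String × String × String) : Decidable (Spec_dfs_array_search2 now graph node name type size out) := by unfold Spec_dfs_array_search2; infer_instance

-- ===== CLAIM (what is proved, stated in full; the proofs are below) =====
def Claim_equal_dfs_array_search2 : Prop := ∀ (now : Int) (graph : List (List Int)) (node : List String) (name : String) (type : String) (size : String), Dom_dfs_array_search2 now graph node name type size → Pre_dfs_array_search2 now graph node name type size → Spec_dfs_array_search2 now graph node name type size (dfs_array_search2 now graph node name type size)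

-- ===== LEMMAS AND PROOFS =====

-- A's recursion is fuel-irrelevant once the fuel exceeds the remaining depth
theorem pvDfsA_fuel (graph : List (List Int)) (node : List String) (root : Int)
    (H : ∀ i : Fin graph.length, root ≤ (i.val : Int) → ∀ j ∈ graph.get i,
      j < (i.val : Int) ∨ ((i.val : Int) < j ∧ j < (graph.length : Int))) :
    ∀ (f1 f2 : Nat) (now : Int) (st : String × String × String),
      root ≤ now → 0 ≤ now → now < (graph.length : Int) →
      graph.length - now.toNat < f1 → graph.length - now.toNat < f2 →
      pvDfsA graph node f1 now st = pvDfsA graph node f2 now st := by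
  intro f1
  induction f1 with
  | zero => intro f2 now st hr h0 hL h1 h2; omega
  | succ f1 ih =>
    intro f2 now st hr h0 hL h1 h2
    cases f2 with
    | zero => omega
    | succ f2 =>
      simp only [pvDfsA]
      apply PySem.List.foldl_congr_mem
      intro acc x hx
      have hrow : PySem.List.pyGetD graph now [] = graph[now.toNat] :=
        PySem.List.pyGetD_eq_getElem graph [] h0 (by omega)
      rw [hrow] at hx
      have hx' : x ∈ graph.get ⟨now.toNat, by omega⟩ := by simpa using hx
      have hprop := H ⟨now.toNat, by omega⟩ (by simpa [Int.toNat_of_nonneg h0] using hr) x hx'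
      simp only at hprop
      rw [Int.toNat_of_nonneg h0] at hprop
      by_cases hlt : x < now
      · simp [hlt]
      · have hx2 : now < x ∧ x < (graph.length : Int) := by
          rcases hprop with h | h
          · omega
          · exact h
        simp only [hlt, if_false]
        exact ih f2 x acc (by omega) (by omega) hx2.2 (by omega) (by omega)

-- folding A's body over a row equals folding the full-fuel recursion over the guard-filtered row
theorem pvFoldRow (graph : List (List Int)) (node : List String) (root : Int)
    (H : ∀ i : Fin graph.length, root ≤ (i.val : Int) → ∀ j ∈ graph.get i,
      j < (i.val : Int) ∨ ((i.val : Int) < j ∧ j < (graph.length : Int)))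
    (cur : Int) (hc : 0 ≤ cur) (hrc : root ≤ cur) :
    ∀ (row : List Int) (st : String × String × String),
      (∀ j ∈ row, j < cur ∨ (cur < j ∧ j < (graph.length : Int))) →
      (row.filter (pvGuard graph.length cur)).foldl
          (fun st j => pvDfsA graph node (graph.length + 1) j st) st
        = row.foldl (fun st next => if next < cur then st else pvDfsA graph node graph.length next st) st := by
  intro row
  induction row with
  | nil => intro st _; rfl
  | cons j row ih =>
    intro st hrow
    have hj := hrow j (by simp)
    rcases hj with hlt | ⟨hgt, hL⟩
    · have hg : ¬ pvGuard graph.length cur j = true := by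
        simp only [pvGuard, Bool.and_eq_true, decide_eq_true_eq]
        omega
      rw [List.filter_cons_of_neg hg]
      simp only [List.foldl_cons, if_pos hlt]
      exact ih st (fun k hk => hrow k (by simp [hk]))
    · have hg : pvGuard graph.length cur j = true := by
        simp only [pvGuard, Bool.and_eq_true, decide_eq_true_eq]
        exact ⟨⟨hc, hgt⟩, hL⟩
      have hfuel : pvDfsA graph node (graph.length + 1) j st = pvDfsA graph node graph.length j st :=
        pvDfsA_fuel graph node root H _ _ j st (by omega) (by omega) hL (by omega) (by omega)
      rw [List.filter_cons_of_pos hg]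
      simp only [List.foldl_cons, show ¬ j < cur by omega, if_false]
      rw [hfuel]
      exact ih _ (fun k hk => hrow k (by simp [hk]))

-- the stack loop computes the left fold of A's full-fuel recursion over the stack
theorem pvLoopB_eq (graph : List (List Int)) (node : List String) (root : Int)
    (H : ∀ i : Fin graph.length, root ≤ (i.val : Int) → ∀ j ∈ graph.get i,
      j < (i.val : Int) ∨ ((i.val : Int) < j ∧ j < (graph.length : Int))) :
    ∀ (S : List Int) (st : String × String × String),
      (∀ j ∈ S, root ≤ j ∧ 0 ≤ j ∧ j < (graph.length : Int)) →
      pvLoopB graph node S st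
        = S.foldl (fun st j => pvDfsA graph node (graph.length + 1) j st) st := by
  intro S st hS
  induction S, st using pvLoopB.induct graph node with
  | case1 st => simp [pvLoopB]
  | case2 cur rest st st2 children ih =>
    have hcur := hS cur (by simp)
    obtain ⟨hrc, hc0, hcL⟩ := hcur
    have hrow : PySem.List.pyGetD graph cur [] = graph[cur.toNat] :=
      PySem.List.pyGetD_eq_getElem graph [] hc0 (by omega)
    have hmem : ∀ j ∈ PySem.List.pyGetD graph cur [],
        j < cur ∨ (cur < j ∧ j < (graph.length : Int)) := by
      intro j hj
      rw [hrow] at hj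
      have hj' : j ∈ graph.get ⟨cur.toNat, by omega⟩ := by simpa using hj
      have := H ⟨cur.toNat, by omega⟩ (by simpa [Int.toNat_of_nonneg hc0] using hrc) j hj'
      simp only at this
      rw [Int.toNat_of_nonneg hc0] at this
      exact this
    have hvalid : ∀ j ∈ ((PySem.List.pyGetD graph cur []).filter (pvGuard graph.length cur)) ++ rest,
        root ≤ j ∧ 0 ≤ j ∧ j < (graph.length : Int) := by
      intro j hj
      rcases List.mem_append.mp hj with hj | hj
      · have hg : pvGuard graph.length cur j = true := List.of_mem_filter hj
        simp only [pvGuard, Bool.and_eq_true, decide_eq_true_eq] at hg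
        refine ⟨by omega, by omega, by omega⟩
      · exact hS j (by simp [hj])
    simp only [pvLoopB]
    rw [ih hvalid, List.foldl_append, List.foldl_cons]
    congr 1
    rw [pvFoldRow graph node root H cur hc0 hrc _ _ hmem]
    simp only [pvDfsA]
    rfl

-- ===== VERDICT (by name: the statement is the Claim_ definition above) =====
theorem dfs_array_search2_spec : Claim_equal_dfs_array_search2 := by
  intro now graph node name type size _ hpre
  obtain ⟨h0, hL, _, H0⟩ := hpre
  have H : ∀ i : Fin graph.length, now ≤ (i.val : Int) → ∀ j ∈ graph.get i,
      j < (i.val : Int) ∨ ((i.val : Int) < j ∧ j < (graph.length : Int)) :=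
    fun i hi j hj => (H0 i hi j hj).imp id (fun h => ⟨h.1, h.2.1⟩)
  unfold Spec_dfs_array_search2 dfs_array_search2 dfs_array_search2_alt
  rw [pvLoopB_eq graph node now H [now] (name, type, size)
    (by intro j hj; simp at hj; subst hj; exact ⟨le_refl _, h0, hL⟩)]
  rfl
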